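-- pv_equiv track=rewrite | github.com/doing109598087/quorum1 | is_rotation.py | is_rotation_closure
-- ===== SOURCE A (Python) =====
-- def is_two_quorum_intersection(quorum1, quorum2):
--     for num in quorum1:
--         if num in quorum2:
--             return True
--     return False
--
-- def is_rotation_closure(Quorum_system, all_rotation_Quorum_system, N):
--     count = 0
--     for Quorum_system in all_rotation_Quorum_system:
--         for Q in Quorum_system:
--             for i in range(len(Quorum_system)):
--                 if is_two_quorum_intersection(Quorum_system[i], Q):
--                     count += 1
--     if count == (N-1) * len(Quorum_system) * len(Quorum_system):
--         return True
--     else: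
--         return False
-- ===== SOURCE B (Python) =====
-- def is_rotation_closure(Quorum_system, all_rotation_Quorum_system, N):
--     count = 0
--     for Quorum_system in all_rotation_Quorum_system:
--         # inverted index: element -> list of quorum positions containing it
--         index = {}
--         for pos, quorum in enumerate(Quorum_system):
--             for x in quorum:
--                 index.setdefault(x, []).append(pos)
--         # deduplicated set of intersecting ordered position pairs
--         pairs = set()
--         for positions in index.values():
--             for p in positions:
--                 for q in positions:
--                     pairs.add((p, q))
--         count += len(pairs)
--     return count == (N - 1) * len(Quorum_system) * len(Quorum_system)
-- ===== Notes on version B (the rewrite author's own statement) =====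
-- stated objective: faster
-- what changed: Replaces the per-pair quadratic element scans with an inverted index (element -> quorum positions) per rotation and counts the deduplicated set of intersecting position pairs, keeping the loop variable rebinding so the threshold uses the last rotation's length.
import Mathlib
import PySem

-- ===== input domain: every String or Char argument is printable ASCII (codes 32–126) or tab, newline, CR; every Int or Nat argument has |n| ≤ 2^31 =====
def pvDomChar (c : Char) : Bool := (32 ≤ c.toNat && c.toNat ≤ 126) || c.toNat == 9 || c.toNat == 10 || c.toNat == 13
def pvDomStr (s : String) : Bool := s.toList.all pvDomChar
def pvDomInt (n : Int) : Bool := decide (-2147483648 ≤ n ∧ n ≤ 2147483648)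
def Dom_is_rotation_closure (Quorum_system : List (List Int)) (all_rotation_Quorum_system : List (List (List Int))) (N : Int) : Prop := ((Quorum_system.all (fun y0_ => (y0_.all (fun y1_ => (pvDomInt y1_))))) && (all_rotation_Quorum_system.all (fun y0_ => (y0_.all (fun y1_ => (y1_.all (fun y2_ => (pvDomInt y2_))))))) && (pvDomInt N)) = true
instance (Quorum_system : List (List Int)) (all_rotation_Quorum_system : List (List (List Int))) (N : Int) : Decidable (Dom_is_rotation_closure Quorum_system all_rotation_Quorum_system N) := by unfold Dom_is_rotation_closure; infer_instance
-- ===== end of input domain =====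

-- B replaces A's per-pair quadratic element scans by a per-rotation inverted index (element -> quorum
-- positions) and counts the deduplicated set of intersecting ordered position pairs (objective: faster).

-- ===== PORT A =====
def is_two_quorum_intersection (quorum1 quorum2 : List Int) : Bool :=
  quorum1.any (fun num => quorum2.contains num)

def is_rotation_closure (Quorum_system : List (List Int)) (all_rotation_Quorum_system : List (List (List Int))) (N : Int) : Bool :=
  -- count = 0; for Quorum_system in all_rotation_…: …  (the loop rebinds the parameter; state = (count, current Quorum_system))
  let st := all_rotation_Quorum_system.foldl
    (fun (st : Int × List (List Int)) R =>
      (R.foldl (fun count Q =>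
        (PySem.List.pyRange 0 (R.length : Int) 1).foldl (fun count i =>
          if is_two_quorum_intersection (PySem.List.pyGetD R i []) Q then count + 1 else count) count) st.1,
       R))
    (0, Quorum_system)
  decide (st.1 = (N - 1) * (st.2.length : Int) * (st.2.length : Int))

-- ===== PORT B =====
-- index = {}; for pos, quorum in enumerate(Quorum_system): for x in quorum: index.setdefault(x, []).append(pos)
def pvIndex (R : List (List Int)) : PySem.Dict Int (List Int) :=
  (PySem.List.enumerate R).foldl
    (fun d pq => pq.2.foldl (fun d x => d.modify x [] (fun l => l ++ [pq.1])) d)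
    PySem.Dict.empty

-- pairs = set(); for positions in index.values(): for p in positions: for q in positions: pairs.add((p, q))
def pvPairs (vals : List (List Int)) : PySem.Set (Int × Int) :=
  vals.foldl
    (fun s positions =>
      positions.foldl (fun s p =>
        positions.foldl (fun s q => PySem.Set.add s (p, q)) s) s)
    PySem.Set.empty

def is_rotation_closure_alt (Quorum_system : List (List Int)) (all_rotation_Quorum_system : List (List (List Int))) (N : Int) : Bool :=
  let st := all_rotation_Quorum_system.foldl
    (fun (st : Int × List (List Int)) R =>
      (st.1 + PySem.Set.len (pvPairs (PySem.Dict.values (pvIndex R))), R))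
    (0, Quorum_system)
  decide (st.1 = (N - 1) * (st.2.length : Int) * (st.2.length : Int))

-- ===== PRECONDITION & SPEC =====
def Spec_is_rotation_closure (Quorum_system : List (List Int)) (all_rotation_Quorum_system : List (List (List Int))) (N : Int) (out : Bool) : Prop := out = is_rotation_closure_alt Quorum_system all_rotation_Quorum_system N
instance (Quorum_system : List (List Int)) (all_rotation_Quorum_system : List (List (List Int))) (N : Int) (out : Bool) : Decidable (Spec_is_rotation_closure Quorum_system all_rotation_Quorum_system N out) := by unfold Spec_is_rotation_closure; infer_instance

-- ===== CLAIM (what is proved, stated in full; the proofs are below) =====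
def Claim_equal_is_rotation_closure : Prop := ∀ (Quorum_system : List (List Int)) (all_rotation_Quorum_system : List (List (List Int))) (N : Int), Dom_is_rotation_closure Quorum_system all_rotation_Quorum_system N → Spec_is_rotation_closure Quorum_system all_rotation_Quorum_system N (is_rotation_closure Quorum_system all_rotation_Quorum_system N)

-- ===== LEMMAS AND PROOFS =====

-- the (key, position) stream that B's index-building double loop processes, flattened
def pvKL (R : List (List Int)) : List (Int × Int) :=
  (PySem.List.enumerate R).flatMap (fun pq => pq.2.map (fun x => (x, pq.1)))

lemma pvIndex_eq_flat (R : List (List Int)) :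
    pvIndex R = (pvKL R).foldl (fun d p => d.modify p.1 [] (fun l => l ++ [p.2])) PySem.Dict.empty := by
  unfold pvIndex pvKL
  rw [List.flatMap_def, List.foldl_flatten, List.foldl_map]
  simp [List.foldl_map]

lemma mem_getD_pvIndex (R : List (List Int)) (x p : Int) :
    p ∈ (pvIndex R).getD x [] ↔ ∃ k : Nat, k < R.length ∧ p = (k : Int) ∧ x ∈ R.getD k [] := by
  rw [pvIndex_eq_flat, PySem.Dict.getD_foldl_modify_append]
  simp only [PySem.Dict.getD_empty, List.nil_append, List.mem_map, List.mem_filter, pvKL,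
    List.mem_flatMap, PySem.List.mem_enumerate_iff, beq_iff_eq]
  constructor
  · rintro ⟨⟨y, q⟩, ⟨⟨pq, ⟨k, hk, hpq⟩, hmem⟩, heq⟩, rfl⟩
    subst hpq
    simp only [Prod.mk.injEq] at hmem
    obtain ⟨x', hx', rfl, rfl⟩ := hmem
    simp only at heq
    subst heq
    refine ⟨k, hk, by simp, ?_⟩
    rw [List.getD_eq_getElem _ _ hk]
    exact hx'
  · rintro ⟨k, hk, rfl, hx⟩
    refine ⟨(x, (k : Int)), ⟨⟨((k : Int), R[k]), ⟨k, hk, by simp⟩, ?_⟩, rfl⟩, by simp⟩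
    simp only [Prod.mk.injEq]
    exact ⟨x, by rwa [List.getD_eq_getElem _ _ hk] at hx, rfl, by simp⟩

lemma nodup_keys_pvIndex (R : List (List Int)) : (pvIndex R).keys.Nodup := by
  rw [pvIndex_eq_flat]
  exact PySem.Dict.nodup_keys_foldl_modify_key _ _ _ _ _ (by simp [PySem.Dict.keys_empty])

-- membership in the pairs set, level by level
lemma mem_pvPairs_inner (v : List Int) (p : Int) (s : PySem.Set (Int × Int)) (z : Int × Int) :
    z ∈ v.foldl (fun s q => PySem.Set.add s (p, q)) s ↔ z ∈ s ∨ (z.1 = p ∧ z.2 ∈ v) := by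
  induction v generalizing s with
  | nil => simp
  | cons q v ih =>
    simp only [List.foldl_cons, ih, PySem.Set.mem_add]
    constructor
    · rintro (⟨h | h⟩ | h)
      · exact Or.inl h
      · exact Or.inr ⟨by simp [h], by simp [h]⟩
      · exact Or.inr ⟨h.1, by simp [h.2]⟩
    · rintro (h | ⟨h1, h2⟩)
      · exact Or.inl (Or.inl h)
      · rcases List.mem_cons.mp h2 with h2 | h2
        · exact Or.inl (Or.inr (by cases z; simp_all))
        · exact Or.inr ⟨h1, h2⟩

lemma mem_pvPairs_mid (v u : List Int) (s : PySem.Set (Int × Int)) (z : Int × Int) :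
    z ∈ u.foldl (fun s p => v.foldl (fun s q => PySem.Set.add s (p, q)) s) s ↔
      z ∈ s ∨ (z.1 ∈ u ∧ z.2 ∈ v) := by
  induction u generalizing s with
  | nil => simp
  | cons p u ih =>
    simp only [List.foldl_cons, ih, mem_pvPairs_inner]
    constructor
    · rintro (⟨h | h⟩ | h)
      · exact Or.inl h
      · exact Or.inr ⟨by simp [h.1], h.2⟩
      · exact Or.inr ⟨by simp [h.1], h.2⟩
    · rintro (h | ⟨h1, h2⟩)
      · exact Or.inl (Or.inl h)
      · rcases List.mem_cons.mp h1 with h1 | h1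
        · exact Or.inl (Or.inr ⟨h1, h2⟩)
        · exact Or.inr ⟨h1, h2⟩

lemma mem_pvPairs_aux (vals : List (List Int)) (s : PySem.Set (Int × Int)) (z : Int × Int) :
    z ∈ vals.foldl (fun s positions => positions.foldl (fun s p =>
        positions.foldl (fun s q => PySem.Set.add s (p, q)) s) s) s ↔
      z ∈ s ∨ ∃ v ∈ vals, z.1 ∈ v ∧ z.2 ∈ v := by
  induction vals generalizing s with
  | nil => simp
  | cons v vals ih =>
    simp only [List.foldl_cons, ih, mem_pvPairs_mid, List.mem_cons]
    constructor
    · rintro ((h | h) | ⟨w, hw, h⟩)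
      · exact Or.inl h
      · exact Or.inr ⟨v, Or.inl rfl, h⟩
      · exact Or.inr ⟨w, Or.inr hw, h⟩
    · rintro (h | ⟨w, (rfl | hw), h⟩)
      · exact Or.inl (Or.inl h)
      · exact Or.inl (Or.inr h)
      · exact Or.inr ⟨w, hw, h⟩

lemma mem_pvPairs (vals : List (List Int)) (z : Int × Int) :
    z ∈ pvPairs vals ↔ ∃ v ∈ vals, z.1 ∈ v ∧ z.2 ∈ v := by
  rw [pvPairs, mem_pvPairs_aux]
  simp [PySem.Set.empty]

lemma nodup_pvPairs_inner (v : List Int) (p : Int) (s : PySem.Set (Int × Int)) (h : s.Nodup) :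
    (v.foldl (fun s q => PySem.Set.add s (p, q)) s).Nodup := by
  induction v generalizing s with
  | nil => exact h
  | cons q v ih => exact ih _ (PySem.Set.nodup_add _ _ h)

lemma nodup_pvPairs_mid (v u : List Int) (s : PySem.Set (Int × Int)) (h : s.Nodup) :
    (u.foldl (fun s p => v.foldl (fun s q => PySem.Set.add s (p, q)) s) s).Nodup := by
  induction u generalizing s with
  | nil => exact h
  | cons p u ih => exact ih _ (nodup_pvPairs_inner v p s h)

lemma nodup_pvPairs_aux (vals : List (List Int)) (s : PySem.Set (Int × Int)) (h : s.Nodup) :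
    (vals.foldl (fun s positions => positions.foldl (fun s p =>
        positions.foldl (fun s q => PySem.Set.add s (p, q)) s) s) s).Nodup := by
  induction vals generalizing s with
  | nil => exact h
  | cons v vals ih => exact ih _ (nodup_pvPairs_mid v v s h)

lemma nodup_pvPairs (vals : List (List Int)) : (pvPairs vals : List (Int × Int)).Nodup := by
  rw [pvPairs]
  exact nodup_pvPairs_aux vals _ (by simp [PySem.Set.empty])

-- a list is among the index's values iff it is the (nonempty) getD of some key
lemma mem_values_getD (R : List (List Int)) (z : Int × Int) :
    (∃ v ∈ (pvIndex R).values, z.1 ∈ v ∧ z.2 ∈ v) ↔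
      ∃ x : Int, z.1 ∈ (pvIndex R).getD x [] ∧ z.2 ∈ (pvIndex R).getD x [] := by
  constructor
  · rintro ⟨v, hv, h1, h2⟩
    have : ∃ k, (k, v) ∈ (pvIndex R).items := by
      simpa [PySem.Dict.values, List.mem_map, Prod.exists] using hv
    obtain ⟨k, hk⟩ := this
    refine ⟨k, ?_, ?_⟩ <;>
      rw [PySem.Dict.getD_of_mem_items _ hk (nodup_keys_pvIndex R)] <;> assumption
  · rintro ⟨x, h1, h2⟩
    rcases hg : (pvIndex R).get? x with _ | v
    · rw [PySem.Dict.getD_of_get?_eq_none _ _ hg] at h1; simp at h1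
    · have hv : v ∈ (pvIndex R).values := by
        have := PySem.Dict.mem_items_of_get?_eq_some _ hg
        simp only [PySem.Dict.values]
        exact List.mem_map_of_mem this
      rw [PySem.Dict.getD_of_get?_eq_some _ _ hg] at h1 h2
      exact ⟨v, hv, h1, h2⟩

-- A's Bool intersection test as a Prop
lemma is_two_iff (a b : List Int) :
    is_two_quorum_intersection a b = true ↔ ∃ x, x ∈ a ∧ x ∈ b := by
  simp [is_two_quorum_intersection, List.any_eq_true]

-- canonical list of intersecting ordered index pairs (proof-side only)
def pvC (R : List (List Int)) : List (Int × Int) :=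
  ((((List.range R.length) ×ˢ (List.range R.length)).filter
    (fun q => is_two_quorum_intersection (R.getD q.2 []) (R.getD q.1 []))).map
    (fun q => ((q.2 : Int), (q.1 : Int))))

lemma nodup_pvC (R : List (List Int)) : (pvC R).Nodup := by
  refine List.Nodup.map ?_ (List.Nodup.filter _ (List.Nodup.product List.nodup_range List.nodup_range))
  intro a b h
  simp only [Prod.mk.injEq, Nat.cast_inj] at h
  exact Prod.ext h.2 h.1

lemma mem_pvC (R : List (List Int)) (z : Int × Int) :
    z ∈ pvC R ↔ ∃ i : Nat, i < R.length ∧ ∃ j : Nat, j < R.length ∧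
      z = ((i : Int), (j : Int)) ∧ is_two_quorum_intersection (R.getD i []) (R.getD j []) = true := by
  simp only [pvC, List.mem_map, List.mem_filter, Prod.exists]
  constructor
  · rintro ⟨j, i, ⟨hmem, hP⟩, rfl⟩
    rw [List.mem_product] at hmem
    simp only [List.mem_range] at hmem
    exact ⟨i, hmem.2, j, hmem.1, rfl, hP⟩
  · rintro ⟨i, hi, j, hj, rfl, hP⟩
    exact ⟨j, i, ⟨by rw [List.mem_product]; simp [List.mem_range, hi, hj], hP⟩, rfl⟩

lemma mem_pvPairs_values (R : List (List Int)) (z : Int × Int) :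
    z ∈ pvPairs (PySem.Dict.values (pvIndex R)) ↔ z ∈ pvC R := by
  rw [mem_pvPairs, show (PySem.Dict.values (pvIndex R)) = (pvIndex R).values from rfl,
    mem_values_getD, mem_pvC]
  constructor
  · rintro ⟨x, h1, h2⟩
    rw [mem_getD_pvIndex] at h1 h2
    obtain ⟨i, hi, hz1, hx1⟩ := h1
    obtain ⟨j, hj, hz2, hx2⟩ := h2
    exact ⟨i, hi, j, hj, by cases z; simp_all, (is_two_iff _ _).mpr ⟨x, hx1, hx2⟩⟩
  · rintro ⟨i, hi, j, hj, rfl, hP⟩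
    obtain ⟨x, hx1, hx2⟩ := (is_two_iff _ _).mp hP
    exact ⟨x, (mem_getD_pvIndex R x _).mpr ⟨i, hi, rfl, hx1⟩,
              (mem_getD_pvIndex R x _).mpr ⟨j, hj, rfl, hx2⟩⟩

lemma len_pvPairs_eq (R : List (List Int)) :
    PySem.Set.len (pvPairs (PySem.Dict.values (pvIndex R))) = ((pvC R).length : Int) := by
  have hperm : (pvPairs (PySem.Dict.values (pvIndex R)) : List (Int × Int)).Perm (pvC R) :=
    (List.perm_ext_iff_of_nodup (nodup_pvPairs _) (nodup_pvC R)).mpr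
      (fun z => mem_pvPairs_values R z)
  simp [PySem.Set.len, hperm.length_eq]

-- A's per-rotation contribution equals the length of the canonical pair list
lemma countP_product {α β : Type} (l1 : List α) (l2 : List β) (p : α × β → Bool) :
    (l1 ×ˢ l2).countP p = (l1.map (fun a => l2.countP (fun b => p (a, b)))).sum := by
  induction l1 with
  | nil => simp [List.nil_product]
  | cons a l1 ih =>
    rw [List.product_cons, List.countP_append, ih]
    simp [List.countP_map, Function.comp_def]

lemma map_eq_map_range {α β : Type} (l : List α) (d : α) (f : α → β) :
    l.map f = (List.range l.length).map (fun j => f (l.getD j d)) := by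
  apply List.ext_getElem
  · simp
  · intro i h1 h2
    simp only [List.getElem_map, List.getElem_range, List.getD_eq_getElem?_getD]
    rw [List.getElem?_eq_getElem (by simpa using h2)]
    rfl

lemma rotA_eq (R : List (List Int)) (c : Int) :
    R.foldl (fun count Q =>
        (PySem.List.pyRange 0 (R.length : Int) 1).foldl (fun count i =>
          if is_two_quorum_intersection (PySem.List.pyGetD R i []) Q then count + 1 else count) count) c
      = c + ((pvC R).length : Int) := by
  rw [PySem.List.foldl_congr_mem R _
      (fun count Q => count + ((List.range R.length).countP
        (fun i => is_two_quorum_intersection (R.getD i []) Q) : Int)) c ?_]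
  · rw [PySem.List.foldl_add]
    congr 1
    rw [map_eq_map_range R [] ]
    rw [pvC, List.length_map, ← List.countP_eq_length_filter, countP_product,
      Nat.cast_list_sum, List.map_map]
    rfl
  · intro acc Q _
    rw [PySem.List.foldl_count_if]
    congr 1
    rw [PySem.List.pyRange_zero_natCast, List.countP_map, Int.natCast_inj]
    apply List.countP_congr
    intro i _
    simp [PySem.List.pyGetD_natCast, List.getD]

lemma rot_eq (R : List (List Int)) (c : Int) :
    R.foldl (fun count Q =>
        (PySem.List.pyRange 0 (R.length : Int) 1).foldl (fun count i =>
          if is_two_quorum_intersection (PySem.List.pyGetD R i []) Q then count + 1 else count) count) c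
      = c + PySem.Set.len (pvPairs (PySem.Dict.values (pvIndex R))) := by
  rw [rotA_eq, len_pvPairs_eq]

-- ===== VERDICT (by name: the statement is the Claim_ definition above) =====
theorem is_rotation_closure_spec : Claim_equal_is_rotation_closure := by
  intro QS all N _
  unfold Spec_is_rotation_closure is_rotation_closure is_rotation_closure_alt
  have h : ∀ (st : Int × List (List Int)), ∀ R ∈ all,
      (R.foldl (fun count Q =>
          (PySem.List.pyRange 0 (R.length : Int) 1).foldl (fun count i =>
            if is_two_quorum_intersection (PySem.List.pyGetD R i []) Q then count + 1 else count) count) st.1,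
        R)
        = (st.1 + PySem.Set.len (pvPairs (PySem.Dict.values (pvIndex R))), R) :=
    fun st R _ => congrArg (fun c => (c, R)) (rot_eq R st.1)
  rw [PySem.List.foldl_congr_mem all _ _ (0, QS) h]
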